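-- pv_equiv track=rewrite | github.com/CHETAN9049/Soyabean-price-prediction-AI-ML | data pre processing/msp.py | fill_monthly_msp
-- ===== SOURCE A (Python) =====
-- def fill_monthly_msp(date_list, msp_dict):
--     filled = []
--     sorted_keys = sorted(msp_dict.keys())
--     for date in date_list:
--         applicable_msp = None
--         for key in sorted_keys:
--             if date >= key:
--                 applicable_msp = msp_dict[key]
--             else:
--                 break
--         filled.append(applicable_msp)
--     return filled
-- ===== SOURCE B (Python) =====
-- def _bisect_right(a, x):
--     # rightmost insertion point: first index whose element is > x
--     lo, hi = 0, len(a)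
--     while lo < hi:
--         mid = (lo + hi) // 2
--         if x < a[mid]:
--             hi = mid
--         else:
--             lo = mid + 1
--     return lo
--
--
-- def fill_monthly_msp(date_list, msp_dict):
--     keys = sorted(msp_dict)
--     vals = [msp_dict[k] for k in keys]
--     out = []
--     for d in date_list:
--         i = _bisect_right(keys, d)
--         out.append(vals[i - 1] if i else None)
--     return out
-- ===== Notes on version B (the rewrite author's own statement) =====
-- stated objective: faster
-- what changed: Replaced the per-date linear scan (with break) over the sorted keys by a single upfront sort plus a hand-written bisect_right binary search for the rightmost key <= date, with values precomputed in key order.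
import Mathlib
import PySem

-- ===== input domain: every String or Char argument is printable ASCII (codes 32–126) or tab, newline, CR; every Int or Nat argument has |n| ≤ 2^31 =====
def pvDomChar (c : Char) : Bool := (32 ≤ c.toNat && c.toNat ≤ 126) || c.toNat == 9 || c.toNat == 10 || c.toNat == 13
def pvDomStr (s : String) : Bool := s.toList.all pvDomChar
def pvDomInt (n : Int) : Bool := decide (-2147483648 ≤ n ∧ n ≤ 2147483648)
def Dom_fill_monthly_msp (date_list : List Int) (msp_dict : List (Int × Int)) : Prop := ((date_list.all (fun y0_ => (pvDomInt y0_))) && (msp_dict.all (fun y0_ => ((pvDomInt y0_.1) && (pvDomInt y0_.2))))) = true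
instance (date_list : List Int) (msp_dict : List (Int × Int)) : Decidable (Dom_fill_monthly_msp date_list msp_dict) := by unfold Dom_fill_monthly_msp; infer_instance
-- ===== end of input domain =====

-- B replaces A's per-date linear scan of the sorted keys by a binary search (bisect_right)
-- for the rightmost key ≤ date on the once-sorted key list; objective: faster.


-- ===== PORT A =====
-- inner `for key in sorted_keys: if date >= key: … else: break` loop;
-- msp_dict[key] is ported as getD … 0: the key always comes from msp_dict's own keys,
-- so the lookup never misses and the default 0 is never used (exact).
def mspScan (mspd : PySem.Dict Int Int) (date : Int) : List Int → Option Int → Option Int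
  | [], acc => acc
  | k :: ks, acc =>
      if date ≥ k then mspScan mspd date ks (some (mspd.getD k 0)) else acc

def fill_monthly_msp (date_list : List Int) (msp_dict : List (Int × Int)) : List (Option Int) :=
  let mspd := PySem.Dict.mk msp_dict
  let sorted_keys := PySem.List.sorted mspd.keys (fun x => x) false
  date_list.foldl (fun filled date => filled ++ [mspScan mspd date sorted_keys none]) []

-- ===== PORT B =====
-- _bisect_right in Source B is exactly Python's bisect.bisect_right loop = PySem.List.bisectRight.
-- vals[i-1] is ported as getD … 0: bisectRight returns 1 ≤ i ≤ len there, so the index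
-- is always in range and the default 0 is never used (exact).
def fill_monthly_msp_alt (date_list : List Int) (msp_dict : List (Int × Int)) : List (Option Int) :=
  let mspd := PySem.Dict.mk msp_dict
  let keys := PySem.List.sorted mspd.keys (fun x => x) false
  let vals := keys.map (fun k => mspd.getD k 0)
  date_list.map (fun d =>
    let i := PySem.List.bisectRight keys d
    if i = 0 then none else some (vals.getD (i - 1) 0))

-- ===== PRECONDITION & SPEC =====
def Spec_fill_monthly_msp (date_list : List Int) (msp_dict : List (Int × Int)) (out : List (Option Int)) : Prop := out = fill_monthly_msp_alt date_list msp_dict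
instance (date_list : List Int) (msp_dict : List (Int × Int)) (out : List (Option Int)) : Decidable (Spec_fill_monthly_msp date_list msp_dict out) := by unfold Spec_fill_monthly_msp; infer_instance

-- ===== CLAIM (what is proved, stated in full; the proofs are below) =====
def Claim_equal_fill_monthly_msp : Prop := ∀ (date_list : List Int) (msp_dict : List (Int × Int)), Dom_fill_monthly_msp date_list msp_dict → Spec_fill_monthly_msp date_list msp_dict (fill_monthly_msp date_list msp_dict)

-- ===== LEMMAS AND PROOFS =====

-- A's break-scan on ANY list split at position i (first i elements ≤ date, rest > date)
-- returns the value at the split's last key.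
theorem mspScan_split (mspd : PySem.Dict Int Int) (date : Int) :
    ∀ (ks : List Int) (acc : Option Int) (i : Nat), i ≤ ks.length →
      (∀ (j : Nat) (hj : j < ks.length), j < i → ks[j] ≤ date) →
      (∀ (j : Nat) (hj : j < ks.length), i ≤ j → date < ks[j]) →
      mspScan mspd date ks acc =
        if i = 0 then acc else some (mspd.getD (ks.getD (i - 1) 0) 0) := by
  intro ks
  induction ks with
  | nil =>
      intro acc i hi _ _
      have h0 : i = 0 := Nat.le_zero.mp (by simpa using hi)
      simp [mspScan, h0]
  | cons k t ih =>
      intro acc i hi hle hgt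
      cases i with
      | zero =>
          have hd : date < k := hgt 0 (by simp) (Nat.zero_le 0)
          simp [mspScan, not_le.mpr hd]
      | succ m =>
          have hk : k ≤ date := hle 0 (by simp) (Nat.succ_pos m)
          have hrec := ih (some (mspd.getD k 0)) m
            (by simpa using Nat.succ_le_succ_iff.mp hi)
            (fun j hj hji => by
              have := hle (j + 1) (by simpa using Nat.succ_lt_succ hj) (Nat.succ_lt_succ hji)
              simpa using this)
            (fun j hj hji => by
              have := hgt (j + 1) (by simpa using Nat.succ_lt_succ hj) (Nat.succ_le_succ hji)
              simpa using this)
          simp only [mspScan, ge_iff_le, if_pos hk, hrec]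
          cases m with
          | zero => simp
          | succ p => simp

theorem foldl_append_singleton (g : Int → Option Int) (l : List Int) (acc : List (Option Int)) :
    l.foldl (fun acc x => acc ++ [g x]) acc = acc ++ l.map g := by
  induction l generalizing acc with
  | nil => simp
  | cons h t ih => simp [List.foldl_cons, ih]

-- per-date agreement of the two inner computations on the sorted key list
theorem scan_eq_bisect (mspd : PySem.Dict Int Int) (keys : List Int)
    (hs : keys.Pairwise (fun a b => a ≤ b)) (d : Int) :
    mspScan mspd d keys none =
      (let i := PySem.List.bisectRight keys d
       if i = 0 then none
       else some ((keys.map (fun k => mspd.getD k 0)).getD (i - 1) 0)) := by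
  obtain ⟨hlen, hle, hgt⟩ := PySem.List.bisectRight_spec keys d hs
  set i := PySem.List.bisectRight keys d with hi
  rw [mspScan_split mspd d keys none i hlen (fun j hj hji => hle j hj hji)
        (fun j hj hji => hgt j hj hji)]
  by_cases h0 : i = 0
  · simp [h0]
  · have hpos : 0 < i := Nat.pos_of_ne_zero h0
    have hidx : i - 1 < keys.length := lt_of_lt_of_le (Nat.sub_lt hpos one_pos) hlen
    simp only [if_neg h0]
    congr 1
    rw [List.getD_eq_getElem?_getD, List.getD_eq_getElem?_getD,
        List.getElem?_map, List.getElem?_eq_getElem hidx]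
    simp

-- ===== VERDICT (by name: the statement is the Claim_ definition above) =====
theorem fill_monthly_msp_spec : Claim_equal_fill_monthly_msp := by
  intro date_list msp_dict _
  unfold Spec_fill_monthly_msp fill_monthly_msp fill_monthly_msp_alt
  simp only []
  rw [foldl_append_singleton]
  simp only [List.nil_append]
  apply List.map_congr_left
  intro d _
  exact scan_eq_bisect _ _ (by
    simpa using PySem.List.sorted_pairwise (PySem.Dict.mk msp_dict).keys (fun x => x)) d
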